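-- pv_equiv track=rewrite | github.com/EmyleSantos/ProjetoFinalHeM | heuristicas_v3.py | consolidar_barras
-- ===== SOURCE A (Python) =====
-- import copy
--
-- def consolidar_barras(capacidade, solucao):
--     """Tenta mesclar barras parcialmente cheias"""
--     if len(solucao) <= 1:
--         return None, False
--
--     # Ordena por utilização
--     barras_ordenadas = sorted(enumerate(solucao), key=lambda x: sum(x[1]))
--
--     for i in range(len(barras_ordenadas)):
--         idx_i, barra_i = barras_ordenadas[i]
--
--         for j in range(i+1, len(barras_ordenadas)):
--             idx_j, barra_j = barras_ordenadas[j]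
--
--             if sum(barra_i) + sum(barra_j) <= capacidade:
--                 # Pode mesclar!
--                 nova_solucao = []
--                 barra_mesclada = barra_i + barra_j
--
--                 for k, barra in enumerate(solucao):
--                     if k == idx_i:
--                         nova_solucao.append(barra_mesclada)
--                     elif k != idx_j:
--                         nova_solucao.append(copy.deepcopy(barra))
--
--                 return nova_solucao, True
--
--     return None, False
-- ===== SOURCE B (Python) =====
-- def consolidar_barras(capacidade, solucao):
--     """Tenta mesclar barras parcialmente cheias (one pass: merge the two least-loaded bars)"""
--     if len(solucao) <= 1:
--         return None, False
--
--     # Single scan for the two smallest bar loads (ties broken by earlier index,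
--     # matching a stable sort by load).
--     best = None
--     second = None
--     for k, barra in enumerate(solucao):
--         s = sum(barra)
--         if best is None or s < best[0]:
--             second = best
--             best = (s, k)
--         elif second is None or s < second[0]:
--             second = (s, k)
--
--     (s1, i1), (s2, i2) = best, second
--     if s1 + s2 > capacidade:
--         return None, False
--
--     merged = solucao[i1] + solucao[i2]
--     nova = [merged if k == i1 else list(barra)
--             for k, barra in enumerate(solucao) if k != i2]
--     return nova, True
-- ===== Notes on version B (the rewrite author's own statement) =====
-- stated objective: faster
-- what changed: A sorts all bars by load and runs a nested O(n^2) pair scan; since the first viable pair is always the two least-loaded bars, B replaces sort+nested loops with a single pass that tracks the two smallest loads (stable tie-break by index) and checks just that one pair.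
import Mathlib
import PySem

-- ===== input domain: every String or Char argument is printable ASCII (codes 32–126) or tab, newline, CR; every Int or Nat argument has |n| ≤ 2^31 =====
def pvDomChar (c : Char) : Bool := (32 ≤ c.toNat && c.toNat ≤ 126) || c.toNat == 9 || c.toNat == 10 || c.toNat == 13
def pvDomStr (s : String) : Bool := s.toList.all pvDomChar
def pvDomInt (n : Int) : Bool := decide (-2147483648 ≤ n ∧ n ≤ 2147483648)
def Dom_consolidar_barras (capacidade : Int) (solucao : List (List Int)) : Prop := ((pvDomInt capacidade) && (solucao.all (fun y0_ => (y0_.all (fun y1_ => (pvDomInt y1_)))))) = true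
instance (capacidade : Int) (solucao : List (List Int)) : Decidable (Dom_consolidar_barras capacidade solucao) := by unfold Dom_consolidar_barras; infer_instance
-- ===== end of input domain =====

-- B replaces A's sort + nested O(n^2) pair scan by a single pass tracking the two
-- least-loaded bars (the only pair A can ever merge); objective: faster (asymptotic).

-- ===== PORT A =====
-- the inner 'for k, barra in enumerate(solucao)' rebuild loop of A
def pvBuildA (ji jj : Int) (merged : List Int) (solucao : List (List Int)) : List (List Int) :=
  (PySem.List.enumerate solucao).foldl
    (fun acc p =>
      if p.1 = ji then acc ++ [merged]
      else if p.1 ≠ jj then acc ++ [p.2]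
      else acc) []

-- the inner 'for j in range(i+1, len(barras_ordenadas))' loop of A
def pvInnerA (capacidade : Int) (ji : Int) (bi : List Int)
    (rest : List (Int × List Int)) (solucao : List (List Int)) : Option (List (List Int)) :=
  match rest with
  | [] => none
  | (jj, bj) :: r =>
      if bi.sum + bj.sum ≤ capacidade then some (pvBuildA ji jj (bi ++ bj) solucao)
      else pvInnerA capacidade ji bi r solucao

-- the outer 'for i in range(len(barras_ordenadas))' loop of A
def pvOuterA (capacidade : Int) (bs : List (Int × List Int)) (solucao : List (List Int)) :
    Option (List (List Int)) :=
  match bs with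
  | [] => none
  | (ji, bi) :: rest =>
      match pvInnerA capacidade ji bi rest solucao with
      | some r => some r
      | none => pvOuterA capacidade rest solucao

def consolidar_barras (capacidade : Int) (solucao : List (List Int)) :
    Option (List (List Int)) × Bool :=
  if solucao.length ≤ 1 then (none, false)
  else
    match pvOuterA capacidade
        (PySem.List.sorted (PySem.List.enumerate solucao) (fun p => p.2.sum)) solucao with
    | some r => (some r, true)
    | none => (none, false)

-- ===== PORT B =====
-- one step of Source B's scan for the two smallest loads (state = (best, second), each (sum, index))
def pvScanB (st : Option (Int × Int) × Option (Int × Int)) (k s : Int) :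
    Option (Int × Int) × Option (Int × Int) :=
  match st with
  | (none, _) => (some (s, k), none)        -- second = best = None here
  | (some b, sec) =>
      if s < b.1 then (some (s, k), some b)
      else
        match sec with
        | none => (some b, some (s, k))
        | some t => if s < t.1 then (some b, some (s, k)) else (some b, some t)

def consolidar_barras_alt (capacidade : Int) (solucao : List (List Int)) :
    Option (List (List Int)) × Bool :=
  if solucao.length ≤ 1 then (none, false)
  else
    match (PySem.List.enumerate solucao).foldl (fun st p => pvScanB st p.1 p.2.sum) (none, none) with
    | (some (s1, i1), some (s2, i2)) =>
        if capacidade < s1 + s2 then (none, false)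
        else
          -- i1, i2 are always valid indices of solucao here, so pyGetD is exact
          let merged := PySem.List.pyGetD solucao i1 [] ++ PySem.List.pyGetD solucao i2 []
          (some ((PySem.List.enumerate solucao).foldl
              (fun acc p => if p.1 = i2 then acc else acc ++ [if p.1 = i1 then merged else p.2]) []),
           true)
    | _ => (none, false)   -- unreachable: with length ≥ 2 the scan yields two entries

-- ===== PRECONDITION & SPEC =====
def Spec_consolidar_barras (capacidade : Int) (solucao : List (List Int)) (out : Option (List (List Int)) × Bool) : Prop := out = consolidar_barras_alt capacidade solucao
instance (capacidade : Int) (solucao : List (List Int)) (out : Option (List (List Int)) × Bool) : Decidable (Spec_consolidar_barras capacidade solucao out) := by unfold Spec_consolidar_barras; infer_instance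

-- ===== CLAIM (what is proved, stated in full; the proofs are below) =====
def Claim_equal_consolidar_barras : Prop := ∀ (capacidade : Int) (solucao : List (List Int)), Dom_consolidar_barras capacidade solucao → Spec_consolidar_barras capacidade solucao (consolidar_barras capacidade solucao)

-- ===== LEMMAS AND PROOFS =====

-- projection: the (sum, index) view of the first two elements of a list of bars
def pvProj (l : List (Int × List Int)) : Option (Int × Int) × Option (Int × Int) :=
  match l with
  | [] => (none, none)
  | [a] => (some (a.2.sum, a.1), none)
  | a :: b :: _ => (some (a.2.sum, a.1), some (b.2.sum, b.1))

theorem pvProj_insertBy (x : Int × List Int) (t : List (Int × List Int)) :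
    pvProj (PySem.List.insertBy (fun a b => decide (a.2.sum < b.2.sum)) x t)
      = pvScanB (pvProj t) x.1 x.2.sum := by
  match t with
  | [] => simp [PySem.List.insertBy, pvProj, pvScanB]
  | [a] =>
      simp only [PySem.List.insertBy, pvProj, pvScanB]
      by_cases h : x.2.sum < a.2.sum <;> simp [h]
  | a :: b :: r =>
      simp only [PySem.List.insertBy, pvProj, pvScanB]
      by_cases h1 : x.2.sum < a.2.sum
      · simp [h1]
      · by_cases h2 : x.2.sum < b.2.sum <;>
          simp [h1, h2]

theorem pvProj_foldl (l t : List (Int × List Int)) :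
    pvProj (l.foldl (fun acc x =>
        PySem.List.insertBy (fun a b => decide (a.2.sum < b.2.sum)) x acc) t)
      = l.foldl (fun st p => pvScanB st p.1 p.2.sum) (pvProj t) := by
  induction l generalizing t with
  | nil => rfl
  | cons x xs ih => simp only [List.foldl_cons, ih, pvProj_insertBy]

theorem pvInnerA_none (capacidade ji : Int) (bi : List Int) (solucao : List (List Int)) :
    ∀ (rest : List (Int × List Int)), (∀ p ∈ rest, capacidade < bi.sum + p.2.sum) →
      pvInnerA capacidade ji bi rest solucao = none := by
  intro rest
  induction rest with
  | nil => intro _; rfl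
  | cons p r ih =>
      intro h
      have hp := h p (List.mem_cons_self ..)
      simp only [pvInnerA]
      rw [if_neg (by omega)]
      exact ih (fun q hq => h q (List.mem_cons_of_mem _ hq))

theorem pvOuterA_none (capacidade : Int) (solucao : List (List Int)) :
    ∀ (l : List (Int × List Int)),
      l.Pairwise (fun a b => a.2.sum ≤ b.2.sum) →
      (∀ a b r', l = a :: b :: r' → capacidade < a.2.sum + b.2.sum) →
      pvOuterA capacidade l solucao = none := by
  intro l
  induction l with
  | nil => intro _ _; rfl
  | cons x xs ih =>
      intro hpw hhd
      match xs, hpw with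
      | [], _ => rfl
      | y :: ys, hpw =>
          have hxy : x.2.sum ≤ y.2.sum := (List.pairwise_cons.1 hpw).1 y (List.mem_cons_self ..)
          have hxall := (List.pairwise_cons.1 hpw).1
          have hpw' : (y :: ys).Pairwise (fun a b => a.2.sum ≤ b.2.sum) :=
            (List.pairwise_cons.1 hpw).2
          have hyall := (List.pairwise_cons.1 hpw').1
          have hcap : capacidade < x.2.sum + y.2.sum := hhd x y ys rfl
          simp only [pvOuterA]
          rw [pvInnerA_none capacidade x.1 x.2 solucao (y :: ys) ?_]
          · exact ih hpw' (by
              intro a b r' heq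
              cases heq
              have hxb : x.2.sum ≤ b.2.sum := hxall b (List.mem_cons_of_mem _ (List.mem_cons_self ..))
              have hyb : y.2.sum ≤ b.2.sum := hyall b (List.mem_cons_self ..)
              omega)
          · intro p hp
            rcases List.mem_cons.1 hp with h | h
            · subst h; omega
            · have := hyall p h; omega

theorem pvMem_getD (solucao : List (List Int)) (j : Int) (b : List Int)
    (h : (j, b) ∈ PySem.List.enumerate solucao) : PySem.List.pyGetD solucao j [] = b := by
  rcases (PySem.List.mem_enumerate_iff solucao 0 (j, b)).1 h with ⟨k, hk, hp⟩
  have h1 : j = (k : Int) := by simpa using congrArg Prod.fst hp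
  have h2 : b = solucao[k] := congrArg Prod.snd hp
  subst h1
  rw [PySem.List.pyGetD_eq_getElem solucao [] (by positivity) (by exact_mod_cast hk)]
  simp [h2]

theorem consolidar_barras_spec : Claim_equal_consolidar_barras := by
  intro capacidade solucao _
  unfold Spec_consolidar_barras
  by_cases hlen : solucao.length ≤ 1
  · simp [consolidar_barras, consolidar_barras_alt, hlen]
  · -- length ≥ 2 : analyse the sorted list
    have hlen2 : 2 ≤ solucao.length := by omega
    set bs := PySem.List.sorted (PySem.List.enumerate solucao) (fun p => p.2.sum) with hbs
    have hbslen : bs.length = solucao.length := by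
      rw [hbs, PySem.List.length_sorted, PySem.List.length_enumerate]
    have hscan : (PySem.List.enumerate solucao).foldl
        (fun st p => pvScanB st p.1 p.2.sum) (none, none) = pvProj bs := by
      rw [hbs, PySem.List.sorted_eq_foldl_insertBy]
      exact (pvProj_foldl _ []).symm
    match hbse : bs with
    | [] => rw [hbse] at hbslen; simp only [List.length_nil] at hbslen; omega
    | [a] => rw [hbse] at hbslen; simp only [List.length_cons, List.length_nil] at hbslen; omega
    | (j1, b1) :: (j2, b2) :: rest =>
      have hmem1 : (j1, b1) ∈ PySem.List.enumerate solucao := by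
        rw [← PySem.List.mem_sorted (PySem.List.enumerate solucao) (fun p => p.2.sum) false]
        rw [← hbs, hbse]; exact List.mem_cons_self ..
      have hmem2 : (j2, b2) ∈ PySem.List.enumerate solucao := by
        rw [← PySem.List.mem_sorted (PySem.List.enumerate solucao) (fun p => p.2.sum) false]
        rw [← hbs, hbse]; exact List.mem_cons_of_mem _ (List.mem_cons_self ..)
      have hpw : bs.Pairwise (fun a b => a.2.sum ≤ b.2.sum) := by
        rw [hbs]; exact PySem.List.sorted_pairwise _ _
      have hne : j1 ≠ j2 := by
        have hnd : ((PySem.List.enumerate solucao).map Prod.fst).Nodup := by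
          have := PySem.List.pairwise_lt_enumerate solucao 0
          exact List.Pairwise.map Prod.fst (fun a b h => ne_of_lt h) this
        have hperm : (bs.map Prod.fst).Perm ((PySem.List.enumerate solucao).map Prod.fst) :=
          List.Perm.map _ (by rw [hbs]; exact PySem.List.sorted_perm _ _ _)
        have : (bs.map Prod.fst).Nodup := hnd.perm hperm.symm
        rw [hbse] at this
        simp only [List.map_cons, List.nodup_cons, List.mem_cons] at this
        exact fun h => this.1 (Or.inl h)
      rw [hbse] at hscan
      simp only [pvProj] at hscan
      by_cases hcap : capacidade < b1.sum + b2.sum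
      · -- no pair fits: both return (none, false)
        have houter : pvOuterA capacidade bs solucao = none := by
          apply pvOuterA_none capacidade solucao bs hpw
          intro a b r' heq
          rw [hbse] at heq
          cases heq
          simpa using hcap
        rw [hbse] at houter
        simp only [consolidar_barras, consolidar_barras_alt, if_neg hlen, ← hbs, hbse, houter,
          hscan, if_pos hcap]
      · -- the two least-loaded bars merge: both build the same new solution
        have houter : pvOuterA capacidade ((j1, b1) :: (j2, b2) :: rest) solucao
            = some (pvBuildA j1 j2 (b1 ++ b2) solucao) := by
          simp only [pvOuterA, pvInnerA, if_pos (by omega : b1.sum + b2.sum ≤ capacidade)]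
        have hget1 : PySem.List.pyGetD solucao j1 [] = b1 := pvMem_getD _ _ _ hmem1
        have hget2 : PySem.List.pyGetD solucao j2 [] = b2 := pvMem_getD _ _ _ hmem2
        have hbuild : pvBuildA j1 j2 (b1 ++ b2) solucao
            = (PySem.List.enumerate solucao).foldl
                (fun acc p => if p.1 = j2 then acc
                  else acc ++ [if p.1 = j1 then b1 ++ b2 else p.2]) [] := by
          unfold pvBuildA
          congr 1
          funext acc p
          by_cases h1 : p.1 = j1
          · have h2 : p.1 ≠ j2 := h1 ▸ hne
            simp [h1, hne]
          · by_cases h2 : p.1 = j2 <;> simp [h1, h2, hne.symm]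
        simp only [consolidar_barras, consolidar_barras_alt, if_neg hlen, ← hbs, hbse, houter,
          hscan, if_neg hcap, hget1, hget2, hbuild]
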